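-- pv_equiv track=rewrite | github.com/cupi2-ip/IPBook | content/nivel4/programas/compresion.py | comprimir
-- ===== SOURCE A (Python) =====
-- def comprimir(cadena: str) -> tuple:
--   tam = len(cadena)
--   unos = []
--   pos = 0
--   while pos < len(cadena):
--     if cadena[pos] == '0':
--       pos += 1
--     else:
--       inicio = pos
--       cantidad = 0
--       while pos < len(cadena) and cadena[pos] == '1':
--         cantidad += 1
--         pos += 1
--       unos.append((inicio, cantidad))
--   return (tam, unos)
-- ===== SOURCE B (Python) =====
-- def comprimir(cadena: str) -> tuple:
--   # Stage 1: run-length encode the WHOLE string into (char, count) runs.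
--   def runs(s):
--     if not s:
--       return []
--     k = 1
--     while k < len(s) and s[k] == s[0]:
--       k += 1
--     return [(s[0], k)] + runs(s[k:])
--   # Stage 2: walk the run list, keeping only the '1' runs with their start positions.
--   unos = []
--   pos = 0
--   for ch, k in runs(cadena):
--     if ch == '1':
--       unos.append((pos, k))
--     pos += k
--   return (len(cadena), unos)
-- ===== Notes on version B (the rewrite author's own statement) =====
-- stated objective: alternative
-- what changed: B first materialises a full run-length encoding of the string (recursive grouping pass over ALL maximal equal-character runs, zero-runs included) and then derives the one-run positions in a second pass over that run list, instead of A's single nested-while pointer loop that skips zeros one by one and counts only one-runs inline; Pre_ excludes strings containing a non-binary character, on which A's outer loop stops advancing and never returns.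
-- outside the precondition, e.g. on comprimir('2'): A does not finish within the time limit, B returns (1, [])
import Mathlib
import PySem

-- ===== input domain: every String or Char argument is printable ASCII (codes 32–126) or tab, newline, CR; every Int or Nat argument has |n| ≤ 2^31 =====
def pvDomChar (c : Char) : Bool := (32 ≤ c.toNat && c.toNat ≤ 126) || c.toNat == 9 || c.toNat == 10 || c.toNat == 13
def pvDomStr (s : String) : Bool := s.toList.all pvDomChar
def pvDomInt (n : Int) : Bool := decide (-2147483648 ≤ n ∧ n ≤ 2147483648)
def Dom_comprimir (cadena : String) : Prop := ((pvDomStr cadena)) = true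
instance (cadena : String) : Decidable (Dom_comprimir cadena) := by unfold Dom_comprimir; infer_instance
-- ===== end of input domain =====

set_option maxRecDepth 4096


-- B run-length encodes the whole string first, then reads the '1' runs with their
-- positions off that run list in a second pass (objective: alternative; same O(n) cost).

-- ===== PORT A =====
-- outer while loop; the inner `while … == '1'` run-counter is the takeWhile/dropWhile pair
def pvLoopA (cs : List Char) (pos : Int) (acc : List (Int × Int)) : List (Int × Int) :=
  match cs with
  | [] => acc
  | c :: rest =>
    if c == '0' then pvLoopA rest (pos + 1) acc
    else if c == '1' then
      pvLoopA (rest.dropWhile (· == '1')) (pos + 1 + (rest.takeWhile (· == '1')).length)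
        (acc ++ [(pos, 1 + ((rest.takeWhile (· == '1')).length : Int))])
    else
      -- Python appends (pos, 0) and never advances here (infinite loop); we advance one
      -- char to terminate — such inputs lie outside Pre_comprimir.
      pvLoopA rest (pos + 1) (acc ++ [(pos, 0)])
termination_by cs.length
decreasing_by
  · simp
  · simpa using Nat.lt_succ_of_le (List.length_dropWhile_le _ _)
  · simp

def comprimir (cadena : String) : Int × (List (Int × Int)) :=
  (PySem.Str.len cadena, pvLoopA cadena.toList 0 [])

-- ===== PORT B =====
-- stage 1 of Source B: `runs` — recursive run-length encoding of the whole string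
-- (the inner `while s[k] == s[0]` counter is the takeWhile length)
def pvRunsB (cs : List Char) : List (Char × Int) :=
  match cs with
  | [] => []
  | c :: rest =>
    (c, 1 + ((rest.takeWhile (· == c)).length : Int)) :: pvRunsB (rest.dropWhile (· == c))
termination_by cs.length
decreasing_by simpa using Nat.lt_succ_of_le (List.length_dropWhile_le _ _)

-- stage 2 of Source B: the for-loop over the run list, state = (pos, unos)
def pvFoldB (rs : List (Char × Int)) (pos : Int) (unos : List (Int × Int)) :
    List (Int × Int) :=
  match rs with
  | [] => unos
  | (c, k) :: rest =>
    if c == '1' then pvFoldB rest (pos + k) (unos ++ [(pos, k)])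
    else pvFoldB rest (pos + k) unos

def comprimir_alt (cadena : String) : Int × (List (Int × Int)) :=
  (PySem.Str.len cadena, pvFoldB (pvRunsB cadena.toList) 0 [])

-- ===== PRECONDITION & SPEC =====
-- Pre_ excludes exactly the strings containing a non-binary character:
-- on those A never returns (its outer loop stops advancing and appends forever).
def Pre_comprimir (cadena : String) : Prop := (cadena.toList.all (fun c => c == '0' || c == '1')) = true
instance (cadena : String) : Decidable (Pre_comprimir cadena) := by unfold Pre_comprimir; infer_instance
def pvWitness_comprimir : String := "0110100"

def Spec_comprimir (cadena : String) (out : Int × (List (Int × Int))) : Prop := out = comprimir_alt cadena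
instance (cadena : String) (out : Int × (List (Int × Int))) : Decidable (Spec_comprimir cadena out) := by unfold Spec_comprimir; infer_instance

-- ===== CLAIM (what is proved, stated in full; the proofs are below) =====
def Claim_equal_comprimir : Prop := ∀ (cadena : String), Dom_comprimir cadena → Pre_comprimir cadena → Spec_comprimir cadena (comprimir cadena)

-- ===== LEMMAS AND PROOFS =====

-- A's outer loop steps over a block of leading zeros one character at a time
theorem pvLoopA_skip_zeros : ∀ (cs : List Char) (pos : Int) (acc : List (Int × Int)),
    pvLoopA cs pos acc =
      pvLoopA (cs.dropWhile (· == '0')) (pos + ((cs.takeWhile (· == '0')).length : Int)) acc := by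
  intro cs
  induction cs with
  | nil => intro pos acc; simp
  | cons c rest ih =>
    intro pos acc
    by_cases hc : c = '0'
    · subst hc
      rw [pvLoopA]
      simp only [beq_self_eq_true, if_true]
      rw [ih, show List.dropWhile (· == '0') ('0' :: rest) = rest.dropWhile (· == '0') by simp,
        show List.takeWhile (· == '0') ('0' :: rest) = '0' :: rest.takeWhile (· == '0') by simp]
      congr 1
      simp only [List.length_cons]
      push_cast
      ring
    · rw [List.dropWhile_cons_of_neg (by simpa using hc), List.takeWhile_cons_of_neg (by simpa using hc)]
      simp

theorem pvFoldB_runs_eq_loopA (m : Nat) : ∀ (cs : List Char), cs.length ≤ m →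
    (∀ c ∈ cs, c = '0' ∨ c = '1') → ∀ (pos : Int) (acc : List (Int × Int)),
    pvFoldB (pvRunsB cs) pos acc = pvLoopA cs pos acc := by
  induction m with
  | zero =>
    intro cs hm _ pos acc
    have : cs = [] := List.eq_nil_of_length_eq_zero (Nat.le_zero.mp hm)
    subst this; simp [pvRunsB, pvFoldB, pvLoopA]
  | succ m ih =>
    intro cs hm hpre pos acc
    match cs with
    | [] => simp [pvRunsB, pvFoldB, pvLoopA]
    | c :: rest =>
      have hsub : ∀ c' ∈ rest.dropWhile (· == c), c' = '0' ∨ c' = '1' := fun c' hc' =>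
        hpre c' (List.mem_cons_of_mem _ ((List.dropWhile_sublist _).subset hc'))
      have hlen : (rest.takeWhile (· == c)).length + (rest.dropWhile (· == c)).length
          = rest.length := by
        rw [← List.length_append, List.takeWhile_append_dropWhile]
      have hm' : (rest.dropWhile (· == c)).length ≤ m := by simp at hm; omega
      rcases hpre c (List.mem_cons_self) with hc | hc
      · subst hc
        rw [pvRunsB, pvFoldB]
        simp only [show ('0' == '1') = false by decide, Bool.false_eq_true, if_false]
        rw [ih _ hm' hsub]
        rw [show pvLoopA ('0' :: rest) pos acc = pvLoopA rest (pos + 1) acc by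
          rw [pvLoopA]; simp]
        rw [pvLoopA_skip_zeros rest]
        congr 1
        ring
      · subst hc
        rw [pvRunsB, pvFoldB]
        simp only [beq_self_eq_true, if_true]
        rw [ih _ hm' hsub]
        rw [show pvLoopA ('1' :: rest) pos acc =
            pvLoopA (rest.dropWhile (· == '1')) (pos + 1 + (rest.takeWhile (· == '1')).length)
              (acc ++ [(pos, 1 + ((rest.takeWhile (· == '1')).length : Int))]) by
          rw [pvLoopA]; simp]
        congr 1
        ring

-- ===== VERDICT (by name: the statement is the Claim_ definition above) =====
theorem comprimir_spec : Claim_equal_comprimir := by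
  intro cadena _ hpre
  unfold Pre_comprimir at hpre
  simp only [List.all_eq_true, beq_iff_eq, Bool.or_eq_true] at hpre
  unfold Spec_comprimir comprimir comprimir_alt
  rw [pvFoldB_runs_eq_loopA cadena.toList.length cadena.toList le_rfl hpre]
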